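-- pv_equiv track=rewrite | github.com/totongaos/CTDL_GiaiThuat_Python | CTDL_Mang_Chuoi/BT18_Mang2ConTro/BT19_DaoNgcChuoi.py | array_OfTwoPoint
-- ===== SOURCE A (Python) =====
-- def array_OfTwoPoint(string_1st):
--     left = 0
--     right = len(string_1st) - 1
--     while left < right:
--         string_1st[left],string_1st[right] = string_1st[right],string_1st[left]
--         right -= 1
--         left += 1
--     return string_1st
-- ===== SOURCE B (Python) =====
-- def array_OfTwoPoint(string_1st):
--     string_1st[:] = string_1st[::-1]
--     return string_1st
-- ===== Notes on version B (the rewrite author's own statement) =====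
-- stated objective: idiomatic
-- what changed: Replaces the two-pointer pairwise swap loop with building the reversed sequence via slicing and writing it back in one slice assignment (same in-place mutation, same return value).
import Mathlib
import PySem

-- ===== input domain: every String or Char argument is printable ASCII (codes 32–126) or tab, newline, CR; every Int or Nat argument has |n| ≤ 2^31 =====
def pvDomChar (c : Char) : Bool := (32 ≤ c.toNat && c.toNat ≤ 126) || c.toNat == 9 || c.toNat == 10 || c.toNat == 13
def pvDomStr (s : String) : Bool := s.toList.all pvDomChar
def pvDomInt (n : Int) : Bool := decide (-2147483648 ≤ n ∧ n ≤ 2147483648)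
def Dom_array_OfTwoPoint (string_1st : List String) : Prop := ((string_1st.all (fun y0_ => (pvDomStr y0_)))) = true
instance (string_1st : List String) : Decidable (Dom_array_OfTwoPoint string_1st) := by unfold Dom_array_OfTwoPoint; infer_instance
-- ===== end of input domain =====

-- B mutates the list in place via slice assignment just as A mutates it by swaps;
-- the equivalence proved here is about the return value.

-- ===== PORT A =====
-- the while-loop: swap xs[left] and xs[right], move the two pointers inward.
-- Indices are Nat: left starts at 0 and only grows, and the loop only runs while
-- left < right ≤ len-1, so both accesses are always in range (getD's default is
-- never used); for the empty list Python's right = -1 and Nat's 0-1 = 0 both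
-- make the loop body never run.
def arrayOfTwoPointLoop (xs : List String) (left right : Nat) : List String :=
  if _h : left < right then
    arrayOfTwoPointLoop ((xs.set left (xs.getD right "")).set right (xs.getD left ""))
      (left + 1) (right - 1)
  else xs
termination_by right - left

def array_OfTwoPoint (string_1st : List String) : List String :=
  arrayOfTwoPointLoop string_1st 0 (string_1st.length - 1)

-- ===== PORT B =====
-- Source B: string_1st[:] = string_1st[::-1]; the slice xs[::-1] is the reversed list.
def array_OfTwoPoint_alt (string_1st : List String) : List String :=
  string_1st.reverse

-- ===== PRECONDITION & SPEC =====
def Spec_array_OfTwoPoint (string_1st : List String) (out : List String) : Prop := out = array_OfTwoPoint_alt string_1st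
instance (string_1st : List String) (out : List String) : Decidable (Spec_array_OfTwoPoint string_1st out) := by unfold Spec_array_OfTwoPoint; infer_instance

-- ===== CLAIM (what is proved, stated in full; the proofs are below) =====
def Claim_equal_array_OfTwoPoint : Prop := ∀ (string_1st : List String), Dom_array_OfTwoPoint string_1st → Spec_array_OfTwoPoint string_1st (array_OfTwoPoint string_1st)

-- ===== LEMMAS AND PROOFS =====

-- Loop invariant: on a list p ++ m ++ s with left = |p| and right = |p| + |m| - 1,
-- the loop reverses exactly the middle segment m.
theorem arrayOfTwoPointLoop_reverse : ∀ (n : Nat) (m p s : List String),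
    m.length = n →
    arrayOfTwoPointLoop (p ++ m ++ s) p.length (p.length + m.length - 1)
      = p ++ m.reverse ++ s := by
  intro n
  induction n using Nat.strong_induction_on with
  | _ n ih =>
    intro m p s hlen
    cases m with
    | nil =>
        rw [arrayOfTwoPointLoop, dif_neg (by simp)]
        simp
    | cons a rest =>
        cases rest using List.reverseRecOn with
        | nil =>
            rw [arrayOfTwoPointLoop, dif_neg (by simp)]
            simp
        | append_singleton t' b =>
            have hlt : p.length < p.length + (a :: (t' ++ [b])).length - 1 := by
              simp
            rw [arrayOfTwoPointLoop, dif_pos hlt]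
            have hgetL : (p ++ (a :: (t' ++ [b])) ++ s).getD p.length "" = a := by
              have e : p ++ (a :: (t' ++ [b])) ++ s
                  = p ++ (a :: (t' ++ [b] ++ s)) := by simp
              rw [e, List.getD_eq_getElem?_getD,
                List.getElem?_append_right (Nat.le_refl _)]
              simp
            have hgetR : (p ++ (a :: (t' ++ [b])) ++ s).getD
                (p.length + (a :: (t' ++ [b])).length - 1) "" = b := by
              have e : p ++ (a :: (t' ++ [b])) ++ s
                  = (p ++ a :: t') ++ (b :: s) := by simp
              rw [e, List.getD_eq_getElem?_getD,
                List.getElem?_append_right (by simp)]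
              have h0 : p.length + (a :: (t' ++ [b])).length - 1
                  - (p ++ a :: t').length = 0 := by simp
              rw [h0]
              simp
            have hset :
                List.set
                  (List.set (p ++ (a :: (t' ++ [b])) ++ s) p.length
                    ((p ++ (a :: (t' ++ [b])) ++ s).getD
                      (p.length + (a :: (t' ++ [b])).length - 1) ""))
                  (p.length + (a :: (t' ++ [b])).length - 1)
                  ((p ++ (a :: (t' ++ [b])) ++ s).getD p.length "")
                = (p ++ [b]) ++ t' ++ ([a] ++ s) := by
              rw [hgetL, hgetR]
              have e1 : p ++ (a :: (t' ++ [b])) ++ s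
                  = p ++ (a :: (t' ++ [b] ++ s)) := by simp
              rw [e1, List.set_append_right _ _ (Nat.le_refl _)]
              simp only [Nat.sub_self, List.set_cons_zero]
              have e2 : p ++ (b :: (t' ++ [b] ++ s))
                  = (p ++ b :: t') ++ (b :: s) := by simp
              rw [e2, List.set_append_right _ _ (by simp)]
              have h0 : p.length + (a :: (t' ++ [b])).length - 1
                  - (p ++ b :: t').length = 0 := by simp
              rw [h0]
              simp
            rw [hset]
            have hl' : p.length + 1 = (p ++ [b]).length := by simp
            have hr' : p.length + (a :: (t' ++ [b])).length - 1 - 1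
                = (p ++ [b]).length + t'.length - 1 := by simp
            rw [hl', hr',
              ih t'.length (by simp at hlen; omega) t' (p ++ [b]) ([a] ++ s) rfl]
            simp

-- ===== VERDICT (by name: the statement is the Claim_ definition above) =====
theorem array_OfTwoPoint_spec : Claim_equal_array_OfTwoPoint := by
  intro xs _
  unfold Spec_array_OfTwoPoint array_OfTwoPoint array_OfTwoPoint_alt
  have := arrayOfTwoPointLoop_reverse xs.length xs [] [] rfl
  simpa using this
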